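-- pv_equiv track=rewrite | github.com/supersciencegrl/website-tools | scrape_conferences.py | decodethemes
-- ===== SOURCE A (Python) =====
-- def decodethemes(themelist):
--     replacelist = [('agro', 'agrochemistry'), ('anal', 'analytical'), ('chembio', 'chem bio'), ('comp', 'computational/data'), ('edu', 'education'), ('inorg', 'inorganic/materials'), ('medchem', 'med chem'), ('policy', 'law/policy'), ('pharm', 'pharma/regulatory')]
--     otherslist = ['automation', 'careers', 'diversity', 'process', 'synthesis']
--
--     if 'all' in themelist:
--         outputlist = sorted([r[1] for r in replacelist] + otherslist)
--     else:
--         names = [r[0] for r in replacelist]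
--         newthemelist = []
--
--         for theme in themelist:
--             if theme in names:
--                 newthemelist.append(replacelist[names.index(theme)][1])
--                 if theme == 'chembio':
--                     newthemelist.append('med chem')
--                 if theme in ['medchem', 'process']:
--                     newthemelist.append('synthesis')
--             else:
--                 newthemelist.append(theme)
--
--         outputlist = [i for n, i in enumerate(newthemelist) if i not in newthemelist[:n]]
--         outputlist.sort()
--
--     themes = (', ').join(outputlist)
--
--     return themes
-- ===== SOURCE B (Python) =====
-- _TABLE = {
--     'agro': ['agrochemistry'],
--     'anal': ['analytical'],
--     'chembio': ['chem bio', 'med chem'],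
--     'comp': ['computational/data'],
--     'edu': ['education'],
--     'inorg': ['inorganic/materials'],
--     'medchem': ['med chem', 'synthesis'],
--     'policy': ['law/policy'],
--     'pharm': ['pharma/regulatory'],
-- }
--
-- _ALL_LABELS = ['agrochemistry', 'analytical', 'chem bio', 'computational/data',
--                'education', 'inorganic/materials', 'med chem', 'law/policy',
--                'pharma/regulatory',
--                'automation', 'careers', 'diversity', 'process', 'synthesis']
--
--
-- def _insert(acc, x):
--     """Insert x into the sorted, duplicate-free list acc, keeping it sorted;
--     return acc unchanged if x is already present."""
--     for i, y in enumerate(acc):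
--         if x == y:
--             return acc
--         if x < y:
--             return acc[:i] + [x] + acc[i:]
--     return acc + [x]
--
--
-- def decodethemes(themelist):
--     # Single pass with a sorted-set accumulator: no sort(), no dedup pass.
--     acc = []
--     if 'all' in themelist:
--         for label in _ALL_LABELS:
--             acc = _insert(acc, label)
--     else:
--         for theme in themelist:
--             for label in _TABLE.get(theme, [theme]):
--                 acc = _insert(acc, label)
--     return ', '.join(acc)
-- ===== Notes on version B (the rewrite author's own statement) =====
-- stated objective: alternative
-- what changed: Replaces A's staged pipeline (index-lookup loop with chembio/medchem/process special-case branches, then a quadratic enumerate-prefix dedup pass, then an in-place sort, then join) by a single pass that folds each theme's expansion into a sorted duplicate-free accumulator via ordered insertion, so no sort(), no set() and no dedup pass exist at all.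
import Mathlib
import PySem

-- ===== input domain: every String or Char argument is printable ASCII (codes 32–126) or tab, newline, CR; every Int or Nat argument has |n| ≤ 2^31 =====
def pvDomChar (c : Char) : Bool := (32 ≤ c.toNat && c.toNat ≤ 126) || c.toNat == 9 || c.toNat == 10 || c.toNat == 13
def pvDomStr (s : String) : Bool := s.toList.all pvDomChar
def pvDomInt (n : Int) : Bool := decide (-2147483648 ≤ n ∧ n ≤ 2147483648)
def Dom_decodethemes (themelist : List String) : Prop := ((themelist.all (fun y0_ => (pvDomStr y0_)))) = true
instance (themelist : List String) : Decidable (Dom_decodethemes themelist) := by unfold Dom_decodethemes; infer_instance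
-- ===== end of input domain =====

-- B replaces A's collect/quadratic-dedup/sort/join pipeline by one pass inserting each expansion into a sorted duplicate-free accumulator (alternative decomposition, similar cost).


-- ===== PORT A =====
def pvReplacelist : List (String × String) :=
  [("agro", "agrochemistry"), ("anal", "analytical"), ("chembio", "chem bio"),
   ("comp", "computational/data"), ("edu", "education"), ("inorg", "inorganic/materials"),
   ("medchem", "med chem"), ("policy", "law/policy"), ("pharm", "pharma/regulatory")]

def pvOtherslist : List String := ["automation", "careers", "diversity", "process", "synthesis"]

-- literal transliteration of A: index-lookup loop with special cases, enumerate dedup, sort, join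
def decodethemes (themelist : List String) : String :=
  let outputlist : List String :=
    if "all" ∈ themelist then
      PySem.List.sorted (pvReplacelist.map (fun r => r.2) ++ pvOtherslist) (fun x => x) false
    else
      let names := pvReplacelist.map (fun r => r.1)
      let newthemelist := themelist.foldl (fun acc theme =>
        if theme ∈ names then
          let acc1 := acc ++ [(PySem.List.pyGetD pvReplacelist (((PySem.List.index? names theme).getD 0 : Nat) : Int) ("", "")).2]
          let acc2 := if theme = "chembio" then acc1 ++ ["med chem"] else acc1
          if theme ∈ (["medchem", "process"] : List String) then acc2 ++ ["synthesis"] else acc2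
        else acc ++ [theme]) []
      let out := (PySem.List.enumerate newthemelist 0).foldl (fun acc p =>
        if p.2 ∈ PySem.List.slice newthemelist none (some p.1) then acc else acc ++ [p.2]) []
      PySem.List.sorted out (fun x => x) false
  PySem.Str.join ", " outputlist

-- ===== PORT B =====
def pvTable : PySem.Dict String (List String) :=
  PySem.Dict.ofList
    [("agro", ["agrochemistry"]), ("anal", ["analytical"]), ("chembio", ["chem bio", "med chem"]),
     ("comp", ["computational/data"]), ("edu", ["education"]), ("inorg", ["inorganic/materials"]),
     ("medchem", ["med chem", "synthesis"]), ("policy", ["law/policy"]), ("pharm", ["pharma/regulatory"])]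

def pvAllLabels : List String :=
  ["agrochemistry", "analytical", "chem bio", "computational/data", "education",
   "inorganic/materials", "med chem", "law/policy", "pharma/regulatory",
   "automation", "careers", "diversity", "process", "synthesis"]

-- _insert: scan the sorted accumulator; drop x if present, splice it in before the first larger element
def pvInsert : List String → String → List String
  | [], x => [x]
  | y :: ys, x => if x = y then y :: ys else if x < y then x :: y :: ys else y :: pvInsert ys x

def decodethemes_alt (themelist : List String) : String :=
  let acc : List String :=
    if "all" ∈ themelist then
      pvAllLabels.foldl pvInsert []
    else
      themelist.foldl (fun acc theme =>
        ((PySem.Dict.get? pvTable theme).getD [theme]).foldl pvInsert acc) []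
  PySem.Str.join ", " acc

-- ===== PRECONDITION & SPEC =====
def Spec_decodethemes (themelist : List String) (out : String) : Prop := out = decodethemes_alt themelist
instance (themelist : List String) (out : String) : Decidable (Spec_decodethemes themelist out) := by unfold Spec_decodethemes; infer_instance

-- ===== CLAIM (what is proved, stated in full; the proofs are below) =====
def Claim_equal_decodethemes : Prop := ∀ (themelist : List String), Dom_decodethemes themelist → Spec_decodethemes themelist (decodethemes themelist)

-- ===== LEMMAS AND PROOFS =====

-- A's comprehension '[i for n, i in enumerate(xs) if i not in xs[:n]]' keeps exactly the first occurrences: it builds set(xs) in insertion order.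
theorem pv_dedup_aux (ys done : List String) (s : PySem.Set String)
    (hs : ∀ x, x ∈ s ↔ x ∈ done) :
    (PySem.List.enumerate ys (done.length : Int)).foldl
      (fun acc p => if p.2 ∈ PySem.List.slice (done ++ ys) none (some p.1) then acc else acc ++ [p.2]) s
    = PySem.Set.update s ys := by
  induction ys generalizing done s with
  | nil => simp [PySem.List.enumerate, PySem.Set.update_nil]
  | cons y ys ih =>
    rw [PySem.List.enumerate_cons, List.foldl_cons]
    have hslice : PySem.List.slice (done ++ y :: ys) none (some (done.length : Int)) = done := by
      rw [PySem.List.slice_to_natCast]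
      exact List.take_left
    have hstep : (if y ∈ PySem.List.slice (done ++ y :: ys) none (some (done.length : Int)) then s else s ++ [y])
        = PySem.Set.add s y := by
      rw [hslice, PySem.Set.add_eq_ite]
      by_cases hy : y ∈ done
      · rw [if_pos hy, if_pos ((hs y).mpr hy)]
      · rw [if_neg hy, if_neg (fun h => hy ((hs y).mp h))]
    rw [hstep, PySem.Set.update_cons]
    have hrw : done ++ y :: ys = (done ++ [y]) ++ ys := by simp
    have hlen : (done.length : Int) + 1 = ((done ++ [y]).length : Int) := by
      simp
    rw [hrw, hlen]
    exact ih (done ++ [y]) (PySem.Set.add s y) (by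
      intro x
      rw [PySem.Set.mem_add]
      simp [hs x, or_comm])

theorem pv_dedup (xs : List String) :
    (PySem.List.enumerate xs 0).foldl
      (fun acc p => if p.2 ∈ PySem.List.slice xs none (some p.1) then acc else acc ++ [p.2]) []
    = PySem.Set.ofList xs := by
  have h := pv_dedup_aux xs [] [] (by simp)
  simpa [PySem.Set.update_nil_left] using h

-- A's per-theme branches append exactly the table's expansion list
theorem pv_step_eq (acc : List String) (t : String) :
    (if t ∈ pvReplacelist.map (fun r => r.1) then
      let acc1 := acc ++ [(PySem.List.pyGetD pvReplacelist (((PySem.List.index? (pvReplacelist.map (fun r => r.1)) t).getD 0 : Nat) : Int) ("", "")).2]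
      let acc2 := if t = "chembio" then acc1 ++ ["med chem"] else acc1
      if t ∈ (["medchem", "process"] : List String) then acc2 ++ ["synthesis"] else acc2
    else acc ++ [t])
    = acc ++ ((PySem.Dict.get? pvTable t).getD [t]) := by
  by_cases h : t ∈ pvReplacelist.map (fun r => r.1)
  · simp only [pvReplacelist, List.map_cons, List.map_nil, List.mem_cons, List.not_mem_nil, or_false] at h
    rcases h with h | h | h | h | h | h | h | h | h <;> subst h <;>
      simp [pvTable, PySem.Dict.ofList, PySem.Dict.get?, PySem.Dict.update, PySem.Dict.insert,
        PySem.Dict.empty, PySem.Dict.contains, PySem.List.index?, PySem.List.pyGetD, pvReplacelist, List.idxOf?] <;> decide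
  · rw [if_neg h]
    simp only [pvReplacelist, List.map_cons, List.map_nil, List.mem_cons, List.not_mem_nil, or_false, not_or] at h
    obtain ⟨h1, h2, h3, h4, h5, h6, h7, h8, h9⟩ := h
    have : PySem.Dict.get? pvTable t = none := by
      simp [pvTable, PySem.Dict.ofList, PySem.Dict.get?]
      intro a b hab
      simp [PySem.Dict.empty, PySem.Dict.update, PySem.Dict.insert, PySem.Dict.contains] at hab
      rcases hab with ⟨ha, _⟩ | ⟨ha, _⟩ | ⟨ha, _⟩ | ⟨ha, _⟩ | ⟨ha, _⟩ | ⟨ha, _⟩ | ⟨ha, _⟩ | ⟨ha, _⟩ | ⟨ha, _⟩ <;>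
        subst ha <;> simpa [eq_comm] using ‹_›
    rw [this]
    rfl

-- pvInsert on a strictly sorted list: stays strictly sorted, and is (as a multiset) Set.add
theorem pv_insert_mem (acc : List String) (x y : String) :
    y ∈ pvInsert acc x ↔ y = x ∨ y ∈ acc := by
  induction acc with
  | nil => simp [pvInsert]
  | cons a as ih =>
    rw [pvInsert]
    split_ifs with h1 h2 <;> (simp [List.mem_cons, ih, h1]; try tauto)

theorem pv_insert_sorted (acc : List String) (x : String)
    (h : acc.Pairwise (· < ·)) : (pvInsert acc x).Pairwise (· < ·) := by
  induction acc with
  | nil => simp [pvInsert]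
  | cons a as ih =>
    rcases List.pairwise_cons.mp h with ⟨ha, has⟩
    by_cases h1 : x = a
    · simpa [pvInsert, h1] using h
    · by_cases h2 : x < a
      · rw [pvInsert, if_neg h1, if_pos h2]
        refine List.pairwise_cons.mpr ⟨?_, h⟩
        intro b hb
        rcases List.mem_cons.mp hb with hb | hb
        · exact hb ▸ h2
        · exact lt_trans h2 (ha b hb)
      · rw [pvInsert, if_neg h1, if_neg h2]
        refine List.pairwise_cons.mpr ⟨?_, ih has⟩
        · intro b hb
          rcases (pv_insert_mem as x b).mp hb with hb | hb
          · subst hb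
            exact lt_of_le_of_ne (not_lt.mp h2) (Ne.symm h1)
          · exact ha b hb

theorem pv_add_cons (a : String) (as : List String) (x : String) (h : x ≠ a) :
    PySem.Set.add (a :: as) x = a :: PySem.Set.add as x := by
  rw [PySem.Set.add_eq_ite, PySem.Set.add_eq_ite]
  by_cases hm : x ∈ as
  · rw [if_pos (List.mem_cons_of_mem a hm), if_pos hm]
  · rw [if_neg (by simp [h, hm]), if_neg hm]
    simp

theorem pv_insert_perm_add (acc : List String) (x : String)
    (h : acc.Pairwise (· < ·)) : (pvInsert acc x).Perm (PySem.Set.add acc x) := by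
  induction acc with
  | nil => simp [pvInsert]
  | cons a as ih =>
    rcases List.pairwise_cons.mp h with ⟨ha, has⟩
    by_cases h1 : x = a
    · simp [pvInsert, h1]
    · by_cases h2 : x < a
      · have hm : x ∉ a :: as := by
          intro hx
          rcases List.mem_cons.mp hx with hx | hx
          · exact h1 hx
          · exact absurd (lt_trans h2 (ha x hx)) (lt_irrefl x)
        rw [pvInsert, if_neg h1, if_pos h2, PySem.Set.add_eq_ite, if_neg hm]
        exact (List.perm_append_singleton x (a :: as)).symm
      · rw [pvInsert, if_neg h1, if_neg h2, pv_add_cons a as x h1]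
        exact (ih has).cons a

theorem pv_update_perm (xs : List String) : ∀ (s s' : PySem.Set String), s.Perm s' →
    (PySem.Set.update s xs).Perm (PySem.Set.update s' xs) := by
  induction xs with
  | nil => intro s s' h; simpa [PySem.Set.update_nil] using h
  | cons x xs ih =>
    intro s s' h
    rw [PySem.Set.update_cons, PySem.Set.update_cons]
    refine ih _ _ ?_
    rw [PySem.Set.add_eq_ite, PySem.Set.add_eq_ite]
    by_cases hm : x ∈ s
    · rw [if_pos hm, if_pos (h.mem_iff.mp hm)]; exact h
    · rw [if_neg hm, if_neg (fun hx => hm (h.mem_iff.mpr hx))]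
      exact h.append_right [x]

theorem pv_foldl_insert (xs : List String) : ∀ (acc : List String),
    acc.Pairwise (· < ·) →
    (xs.foldl pvInsert acc).Pairwise (· < ·) ∧ (xs.foldl pvInsert acc).Perm (PySem.Set.update acc xs) := by
  induction xs with
  | nil => intro acc h; exact ⟨h, by simp [PySem.Set.update_nil]⟩
  | cons x xs ih =>
    intro acc h
    rw [List.foldl_cons, PySem.Set.update_cons]
    obtain ⟨hp, hperm⟩ := ih (pvInsert acc x) (pv_insert_sorted acc x h)
    exact ⟨hp, hperm.trans (pv_update_perm xs _ _ (pv_insert_perm_add acc x h))⟩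

-- B's nested loop over expansions is the fold of pvInsert over the flattened expansion list
theorem pv_nested_foldl (f : String → List String) (xs : List String) : ∀ (acc : List String),
    xs.foldl (fun a t => (f t).foldl pvInsert a) acc = (xs.flatMap f).foldl pvInsert acc := by
  induction xs with
  | nil => intro acc; simp
  | cons x xs ih =>
    intro acc
    rw [List.foldl_cons, ih, List.flatMap_cons, List.foldl_append]

-- ===== VERDICT (by name: the statement is the Claim_ definition above) =====
theorem decodethemes_spec : Claim_equal_decodethemes := by
  intro themelist _
  unfold Spec_decodethemes decodethemes decodethemes_alt
  by_cases hall : "all" ∈ themelist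
  · simp only [hall, if_pos]
    obtain ⟨hp, hperm⟩ := pv_foldl_insert pvAllLabels [] (by simp)
    rw [PySem.Set.update_nil_left] at hperm
    have hofl : PySem.Set.ofList pvAllLabels = pvAllLabels := by decide
    rw [hofl] at hperm
    congr 1
    exact PySem.List.sorted_eq_of_perm_of_pairwise_lt _ _ _ hperm hp
  · simp only [hall, if_neg, not_false_iff]
    have hfold : themelist.foldl (fun acc theme =>
        if theme ∈ pvReplacelist.map (fun r => r.1) then
          let acc1 := acc ++ [(PySem.List.pyGetD pvReplacelist (((PySem.List.index? (pvReplacelist.map (fun r => r.1)) theme).getD 0 : Nat) : Int) ("", "")).2]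
          let acc2 := if theme = "chembio" then acc1 ++ ["med chem"] else acc1
          if theme ∈ (["medchem", "process"] : List String) then acc2 ++ ["synthesis"] else acc2
        else acc ++ [theme]) []
      = themelist.flatMap (fun theme => (PySem.Dict.get? pvTable theme).getD [theme]) := by
      rw [show (themelist.flatMap fun theme => (PySem.Dict.get? pvTable theme).getD [theme])
            = themelist.foldl (fun acc theme => acc ++ ((PySem.Dict.get? pvTable theme).getD [theme])) [] by
        simpa using (PySem.List.foldl_append_eq_flatMap (fun theme => (PySem.Dict.get? pvTable theme).getD [theme]) themelist ([] : List String)).symm]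
      congr 1
      funext acc t
      exact pv_step_eq acc t
    rw [hfold, pv_dedup, pv_nested_foldl]
    obtain ⟨hp, hperm⟩ := pv_foldl_insert (themelist.flatMap (fun theme => (PySem.Dict.get? pvTable theme).getD [theme])) [] (by simp)
    rw [PySem.Set.update_nil_left] at hperm
    rw [PySem.List.sorted_eq_of_perm_of_pairwise_lt _ _ _ hperm hp]
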